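-- pv_equiv track=rewrite | github.com/DAKSie/MusicWithHands | src/main.py | _build_connection_colors
-- ===== SOURCE A (Python) =====
-- from typing import List
--
-- ACCENT_COLOR = (255, 150, 68, 255)
--
-- TEXT_COLOR = (86, 47, 0, 255)
--
-- def _build_connection_colors(connection_count: int) -> List[tuple[int, int, int, int]]:
--     colors: List[tuple[int, int, int, int]] = []
--     if connection_count <= 0:
--         return colors
--
--     palette = [TEXT_COLOR, ACCENT_COLOR]
--     for index in range(connection_count):
--         colors.append(palette[index % len(palette)])
--     return colors
-- ===== SOURCE B (Python) =====
-- from typing import List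
--
-- ACCENT_COLOR = (255, 150, 68, 255)
--
-- TEXT_COLOR = (86, 47, 0, 255)
--
-- def _build_connection_colors(connection_count: int) -> List[tuple[int, int, int, int]]:
--     if connection_count <= 0:
--         return []
--     # Repeated doubling: the 2-periodic pattern stays alternating when an
--     # even-length alternating list is concatenated with itself.
--     colors = [TEXT_COLOR, ACCENT_COLOR]
--     while len(colors) < connection_count:
--         colors = colors + colors
--     return colors[:connection_count]
-- ===== Notes on version B (the rewrite author's own statement) =====
-- stated objective: alternative
-- what changed: Replaces A's per-index loop with palette[index % 2] by repeated doubling: starting from the two-color pattern, the list is concatenated with itself O(log n) times until it covers n elements, then truncated; correctness rests on the pattern's period-2 invariance under even-length doubling.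
import Mathlib
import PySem

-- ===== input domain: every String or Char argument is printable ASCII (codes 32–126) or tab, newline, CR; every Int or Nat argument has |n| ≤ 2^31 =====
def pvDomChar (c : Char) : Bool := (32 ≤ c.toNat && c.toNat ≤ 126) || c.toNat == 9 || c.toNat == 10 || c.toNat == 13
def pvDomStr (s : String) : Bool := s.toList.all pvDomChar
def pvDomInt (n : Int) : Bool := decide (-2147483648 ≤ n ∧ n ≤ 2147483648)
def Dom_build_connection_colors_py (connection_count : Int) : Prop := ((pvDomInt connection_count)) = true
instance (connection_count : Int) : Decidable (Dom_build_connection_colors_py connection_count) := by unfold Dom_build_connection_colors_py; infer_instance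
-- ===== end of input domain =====

-- B builds the alternating list by repeated doubling of the two-color pattern and truncating,
-- instead of A's per-index loop with palette[index % 2] (alternative decomposition).


def pvTextColor : Int × Int × Int × Int := (86, 47, 0, 255)
def pvAccentColor : Int × Int × Int × Int := (255, 150, 68, 255)

-- ===== PORT A =====
-- palette[index % len(palette)]: index % 2 ∈ {0,1} is always in range, so pyGetD's default is never used (exact).
def build_connection_colors_py (connection_count : Int) : List (Int × Int × Int × Int) :=
  let colors : List (Int × Int × Int × Int) := []
  if connection_count ≤ 0 then colors
  else
    let palette := [pvTextColor, pvAccentColor]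
    (PySem.List.pyRange 0 connection_count 1).foldl
      (fun colors index => colors ++ [PySem.List.pyGetD palette (PySem.Int.mod index 2) pvTextColor])
      colors

-- ===== PORT B =====
-- the while loop of Source B; the positivity argument is only a totality guard (the list length doubles)
def pvDoubleLoop (n : Nat) (colors : List (Int × Int × Int × Int)) (h : 0 < colors.length) :
    List (Int × Int × Int × Int) :=
  if hlt : colors.length < n then
    pvDoubleLoop n (colors ++ colors) (by simp; omega)
  else colors
termination_by n - colors.length
decreasing_by simp; omega

def build_connection_colors_py_alt (connection_count : Int) : List (Int × Int × Int × Int) :=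
  if connection_count ≤ 0 then []
  else
    PySem.List.slice (pvDoubleLoop connection_count.toNat [pvTextColor, pvAccentColor] (by simp))
      none (some connection_count)

-- ===== PRECONDITION & SPEC =====
def Spec_build_connection_colors_py (connection_count : Int) (out : List (Int × Int × Int × Int)) : Prop := out = build_connection_colors_py_alt connection_count
instance (connection_count : Int) (out : List (Int × Int × Int × Int)) : Decidable (Spec_build_connection_colors_py connection_count out) := by unfold Spec_build_connection_colors_py; infer_instance

-- ===== CLAIM (what is proved, stated in full; the proofs are below) =====
def Claim_equal_build_connection_colors_py : Prop := ∀ (connection_count : Int), Dom_build_connection_colors_py connection_count → Spec_build_connection_colors_py connection_count (build_connection_colors_py connection_count)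

-- ===== LEMMAS AND PROOFS =====

def pvPal (k : Nat) : Int × Int × Int × Int := if k % 2 = 0 then pvTextColor else pvAccentColor

theorem pv_pyGetD_pal (k : Nat) :
    PySem.List.pyGetD [pvTextColor, pvAccentColor] (PySem.Int.mod (0 + (k : Int)) 2) pvTextColor = pvPal k := by
  rcases Nat.even_or_odd k with ⟨j, hj⟩ | ⟨j, hj⟩
  · subst hj
    have h2 : PySem.Int.mod (0 + ((j + j : Nat) : Int)) 2 = 0 := by
      simp [PySem.Int.mod, Int.fmod_eq_emod]; omega
    rw [h2]; simp [pvPal]; omega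
  · subst hj
    have h2 : PySem.Int.mod (0 + ((2 * j + 1 : Nat) : Int)) 2 = 1 := by
      simp [PySem.Int.mod, Int.fmod_eq_emod]
    rw [h2]
    have : (2 * j + 1) % 2 = 1 := by omega
    simp [pvPal, this, PySem.List.pyGetD, PySem.List.pyGet?, PySem.List.pyIdx?]

-- doubling an even-length prefix of the periodic pattern extends it
theorem pv_pal_double (L : Nat) (hL : L % 2 = 0) :
    (List.range L).map pvPal ++ (List.range L).map pvPal = (List.range (L + L)).map pvPal := by
  rw [List.range_add, List.map_append, List.map_map]
  congr 1
  apply List.map_congr_left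
  intro k _
  simp [pvPal, Nat.add_mod, hL]

theorem pvDoubleLoop_pal (d n L : Nat) (hd : n - L ≤ d) (hL : L % 2 = 0)
    (h : 0 < ((List.range L).map pvPal).length) :
    ∃ M, n ≤ M ∧ pvDoubleLoop n ((List.range L).map pvPal) h = (List.range M).map pvPal := by
  induction d generalizing L with
  | zero =>
    have hnL : ¬ ((List.range L).map pvPal).length < n := by simp; omega
    exact ⟨L, by omega, by rw [pvDoubleLoop, dif_neg hnL]⟩
  | succ d ih =>
    by_cases hlt : ((List.range L).map pvPal).length < n
    · rw [pvDoubleLoop, dif_pos hlt]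
      have hLpos : 0 < L := by simpa using h
      have hLn : L < n := by simpa using hlt
      have hrw : (List.range L).map pvPal ++ (List.range L).map pvPal
          = (List.range (L + L)).map pvPal := pv_pal_double L hL
      have h2 : 0 < ((List.range (L + L)).map pvPal).length := by simp; omega
      have := ih (L + L) (by omega) (by omega) h2
      simpa [hrw] using this
    · exact ⟨L, by simpa using hlt, by rw [pvDoubleLoop, dif_neg hlt]⟩

theorem pv_foldl_push {α β : Type} (f : α → β) (xs : List α) (init : List β) :
    xs.foldl (fun acc x => acc ++ [f x]) init = init ++ xs.map f := by
  induction xs generalizing init with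
  | nil => simp
  | cons x xs ih => simp [List.foldl_cons, ih]

-- ===== VERDICT (by name: the statement is the Claim_ definition above) =====
theorem build_connection_colors_py_spec : Claim_equal_build_connection_colors_py := by
  intro n _
  unfold Spec_build_connection_colors_py build_connection_colors_py build_connection_colors_py_alt
  by_cases h : n ≤ 0
  · simp [h]
  · simp only [if_neg h]
    have hn : (0:Int) ≤ n := by omega
    -- A's side: map pvPal over range n.toNat
    rw [PySem.List.pyRange_one, List.foldl_map, pv_foldl_push, List.nil_append]
    have hmap : (List.range (n - 0).toNat).map
        (fun y : Nat => PySem.List.pyGetD [pvTextColor, pvAccentColor] (PySem.Int.mod (0 + (y : Int)) 2) pvTextColor)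
        = (List.range (n - 0).toNat).map pvPal :=
      List.map_congr_left (fun k _ => pv_pyGetD_pal k)
    rw [hmap]
    -- B's side: the doubling loop yields map pvPal (range M) with n.toNat ≤ M
    have hstart : [pvTextColor, pvAccentColor] = (List.range 2).map pvPal := by
      simp [List.range_succ, pvPal]
    have h2 : 0 < ((List.range 2).map pvPal).length := by simp
    obtain ⟨M, hM, hres⟩ := pvDoubleLoop_pal n.toNat n.toNat 2 (by omega) (by omega) h2
    rw [show (pvDoubleLoop n.toNat [pvTextColor, pvAccentColor] (by simp))
          = pvDoubleLoop n.toNat ((List.range 2).map pvPal) h2 by congr 1,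
        hres, PySem.List.slice_to _ hn, ← List.map_take, List.take_range]
    show (List.range (n - 0).toNat).map pvPal = (List.range (min n.toNat M)).map pvPal
    rw [Nat.min_eq_left hM]
    simp
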